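-- pv_equiv track=rewrite | github.com/leh60245/Algorithm | 백준/Gold/6198. 옥상 정원 꾸미기/옥상 정원 꾸미기.py | foo
-- ===== SOURCE A (Python) =====
-- from collections import deque
--
-- def foo(n, arr):
--     stack = deque()
--
--     ans = 0
--     for i in arr:
--         if not stack:
--             stack.append(i)
--             continue
--         if stack[-1] > i:
--             ans += len(stack)
--             stack.append(i)
--             continue
--         while stack:
--             stack.pop()
--             if stack and stack[-1] > i:
--                 break
--         ans += len(stack)
--         stack.append(i)
--     return ans
-- ===== SOURCE B (Python) =====
-- def foo(n, arr):
--     # brute force: for each building j, count the strictly-shorter buildings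
--     # ahead of it, stopping at the first one of height >= arr[j]
--     ans = 0
--     for j in range(len(arr)):
--         head = arr[j]
--         c = 0
--         for k in range(j + 1, len(arr)):
--             if arr[k] < head:
--                 c += 1
--             else:
--                 break
--         ans += c
--     return ans
-- ===== Notes on version B (the rewrite author's own statement) =====
-- stated objective: alternative
-- what changed: Replaced the monotonic-stack single pass with a direct brute force that, for each suffix head, scans forward counting strictly-shorter buildings until the first one of height >= head.
import Mathlib
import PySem

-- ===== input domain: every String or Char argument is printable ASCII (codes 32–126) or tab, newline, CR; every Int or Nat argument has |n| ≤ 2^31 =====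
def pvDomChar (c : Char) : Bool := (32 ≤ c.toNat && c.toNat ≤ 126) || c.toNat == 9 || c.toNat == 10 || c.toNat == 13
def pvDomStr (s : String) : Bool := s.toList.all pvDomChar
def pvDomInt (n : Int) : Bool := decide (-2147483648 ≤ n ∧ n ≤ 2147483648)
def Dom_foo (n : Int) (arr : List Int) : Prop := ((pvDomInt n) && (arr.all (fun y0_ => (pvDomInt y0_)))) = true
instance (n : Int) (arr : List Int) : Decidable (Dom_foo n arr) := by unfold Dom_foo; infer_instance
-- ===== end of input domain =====

-- B replaces A's monotonic stack by a direct brute-force scan: for each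
-- building, count the strictly-shorter buildings ahead of it until the first
-- of height ≥ it; objective: alternative (not faster).

-- ===== PORT A =====
-- the 'while stack: stack.pop(); if stack and stack[-1] > i: break' loop
-- (stack top at the head of the list; pop = drop the head)
def popLoop (i : Int) : List Int → List Int
  | [] => []
  | _ :: rest =>
    match rest with
    | [] => []
    | r :: _ => if r > i then rest else popLoop i rest

-- the 'for i in arr' loop carrying (stack, ans); branches in A's order
def fooLoop : List Int → List Int → Int → Int
  | [], _, ans => ans
  | i :: rest, stack, ans =>
    match stack with
    | [] => fooLoop rest [i] ans
    | t :: ts =>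
      if t > i then fooLoop rest (i :: t :: ts) (ans + ((t :: ts).length : Int))
      else
        let s' := popLoop i (t :: ts)
        fooLoop rest (i :: s') (ans + (s'.length : Int))

def foo (n : Int) (arr : List Int) : Int := fooLoop arr [] 0

-- ===== PORT B =====
-- the inner 'for x in tail: if x < head: c += 1 else: break' scan
def cntSee (h : Int) : List Int → Int
  | [] => 0
  | x :: xs => if x < h then 1 + cntSee h xs else 0

-- the outer 'while rest:' loop over suffixes
def altGo : List Int → Int
  | [] => 0
  | x :: xs => cntSee x xs + altGo xs

def foo_alt (n : Int) (arr : List Int) : Int := altGo arr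

-- ===== PRECONDITION & SPEC =====
def Spec_foo (n : Int) (arr : List Int) (out : Int) : Prop := out = foo_alt n arr
instance (n : Int) (arr : List Int) (out : Int) : Decidable (Spec_foo n arr out) := by unfold Spec_foo; infer_instance

-- ===== CLAIM (what is proved, stated in full; the proofs are below) =====
def Claim_equal_foo : Prop := ∀ (n : Int) (arr : List Int), Dom_foo n arr → Spec_foo n arr (foo n arr)

-- ===== LEMMAS AND PROOFS =====

-- total contribution of the stack elements to the remaining input l
def S (s l : List Int) : Int := (s.map (fun z => cntSee z l)).sum

theorem S_nil (s : List Int) : S s [] = 0 := by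
  induction s with
  | nil => rfl
  | cons x xs ih => simp_all [S, cntSee]

theorem S_cons (z : Int) (s l : List Int) : S (z :: s) l = cntSee z l + S s l := by
  simp [S]

theorem S_shift (i : Int) (s rest : List Int) (h : ∀ z ∈ s, i < z) :
    S s (i :: rest) = (s.length : Int) + S s rest := by
  induction s with
  | nil => simp [S]
  | cons x xs ih =>
    have hx : i < x := h x (by simp)
    rw [S_cons, S_cons, ih (fun z hz => h z (by simp [hz]))]
    simp [cntSee, hx]
    ring

theorem S_dropWhile (i : Int) (s rest : List Int) :
    S s (i :: rest) = S (s.dropWhile (fun z => decide (z ≤ i))) (i :: rest) := by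
  induction s with
  | nil => rfl
  | cons x xs ih =>
    by_cases hx : x ≤ i
    · have hnx : ¬ i < x := not_lt.mpr hx
      rw [S_cons]
      simp [List.dropWhile, hx, cntSee, hnx]
      exact ih
    · simp [List.dropWhile, hx]

theorem popLoop_eq (i : Int) (t : Int) (ts : List Int) (h : t ≤ i) :
    popLoop i (t :: ts) = (t :: ts).dropWhile (fun z => decide (z ≤ i)) := by
  induction ts generalizing t with
  | nil => simp [popLoop, List.dropWhile, h]
  | cons r ts' ih =>
    by_cases hr : r > i
    · have : ¬ r ≤ i := not_le.mpr hr
      simp [popLoop, List.dropWhile, h, hr, this]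
    · have hr' : r ≤ i := not_lt.mp hr
      simp [popLoop, List.dropWhile, h, hr]
      have := ih r hr'
      simpa [List.dropWhile, hr'] using this

theorem mem_dropWhile_gt (i : Int) (s : List Int) (hs : List.Sorted (· < ·) s) :
    ∀ z ∈ s.dropWhile (fun z => decide (z ≤ i)), i < z := by
  induction s with
  | nil => simp
  | cons x xs ih =>
    intro z hz
    by_cases hx : x ≤ i
    · simp only [List.dropWhile, hx, decide_true] at hz
      exact ih (List.sorted_cons.mp hs).2 z hz
    · simp only [List.dropWhile, hx, decide_false] at hz
      rcases List.mem_cons.mp hz with rfl | hmem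
      · exact not_le.mp hx
      · exact lt_trans (not_le.mp hx) ((List.sorted_cons.mp hs).1 z hmem)

theorem sorted_dropWhile (i : Int) (s : List Int) (hs : List.Sorted (· < ·) s) :
    List.Sorted (· < ·) (s.dropWhile (fun z => decide (z ≤ i))) :=
  List.Pairwise.sublist (List.dropWhile_sublist _) hs

theorem fooLoop_eq (l : List Int) : ∀ (s : List Int) (a : Int),
    List.Sorted (· < ·) s → fooLoop l s a = a + S s l + altGo l := by
  induction l with
  | nil => intro s a _; simp [fooLoop, S_nil, altGo]
  | cons i rest ih =>
    intro s a hs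
    match s with
    | [] =>
      have h1 : List.Sorted (· < ·) [i] := List.Pairwise.cons (by simp) List.Pairwise.nil
      rw [show fooLoop (i :: rest) [] a = fooLoop rest [i] a from rfl, ih [i] a h1]
      simp [S, altGo]
      ring
    | t :: ts =>
      have hts : List.Sorted (· < ·) ts := (List.sorted_cons.mp hs).2
      by_cases hti : t > i
      · have hall : ∀ z ∈ t :: ts, i < z := by
          intro z hz
          rcases List.mem_cons.mp hz with rfl | hmem
          · exact hti
          · exact lt_trans hti ((List.sorted_cons.mp hs).1 z hmem)
        have hsort : List.Sorted (· < ·) (i :: t :: ts) :=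
          List.sorted_cons.mpr ⟨hall, hs⟩
        rw [show fooLoop (i :: rest) (t :: ts) a
              = fooLoop rest (i :: t :: ts) (a + ((t :: ts).length : Int)) by
            simp [fooLoop, hti]]
        rw [ih _ _ hsort, S_cons, S_shift i (t :: ts) rest hall]
        simp [altGo]
        ring
      · have hti' : t ≤ i := not_lt.mp hti
        have hpop : popLoop i (t :: ts) = (t :: ts).dropWhile (fun z => decide (z ≤ i)) :=
          popLoop_eq i t ts hti'
        have hall : ∀ z ∈ (t :: ts).dropWhile (fun z => decide (z ≤ i)), i < z :=
          mem_dropWhile_gt i (t :: ts) hs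
        have hsorted' : List.Sorted (· < ·) ((t :: ts).dropWhile (fun z => decide (z ≤ i))) :=
          sorted_dropWhile i (t :: ts) hs
        have hsort : List.Sorted (· < ·) (i :: (t :: ts).dropWhile (fun z => decide (z ≤ i))) :=
          List.sorted_cons.mpr ⟨hall, hsorted'⟩
        rw [show fooLoop (i :: rest) (t :: ts) a
              = fooLoop rest (i :: popLoop i (t :: ts)) (a + ((popLoop i (t :: ts)).length : Int)) by
            simp [fooLoop, hti]]
        rw [hpop, ih _ _ hsort, S_cons,
            show S (t :: ts) (i :: rest) = S ((t :: ts).dropWhile (fun z => decide (z ≤ i))) (i :: rest) from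
              S_dropWhile i (t :: ts) rest,
            S_shift i _ rest hall]
        simp [altGo]
        ring

-- ===== VERDICT (by name: the statement is the Claim_ definition above) =====
theorem foo_spec : Claim_equal_foo := by
  intro n arr _
  unfold Spec_foo foo foo_alt
  rw [fooLoop_eq arr [] 0 List.Pairwise.nil]
  simp [S]
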